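-- pv_equiv track=rewrite | github.com/drapeaucharles/restaurant_chat | services/mia_chat_service_improved.py | is_factual_query
-- ===== SOURCE A (Python) =====
-- def is_factual_query(message):
--     """Determine if a query is asking for specific factual information"""
--     factual_keywords = [
--         'price', 'cost', 'how much', 'ingredients', 'contains', 'hours',
--         'open', 'close', 'address', 'location', 'phone', 'gluten',
--         'vegan', 'vegetarian', 'allergy', 'calories'
--     ]
--     message_lower = message.lower()
--     return any(keyword in message_lower for keyword in factual_keywords)
-- ===== SOURCE B (Python) =====
-- def is_factual_query(message):
--     """Determine if a query is asking for specific factual information"""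
--     factual_keywords = [
--         'price', 'cost', 'how much', 'ingredients', 'contains', 'hours',
--         'open', 'close', 'address', 'location', 'phone', 'gluten',
--         'vegan', 'vegetarian', 'allergy', 'calories'
--     ]
--     m = message.lower()
--     # single left-to-right pass: at each position, does some keyword start here?
--     for i in range(len(m)):
--         for k in factual_keywords:
--             if m.startswith(k, i):
--                 return True
--     return False
-- ===== Notes on version B (the rewrite author's own statement) =====
-- stated objective: alternative
-- what changed: Replaces A's keyword-major any-loop of 16 independent substring scans with a single position-major left-to-right pass that at each index checks whether some keyword starts there (startswith), a different traversal of the same search space.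
import Mathlib
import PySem

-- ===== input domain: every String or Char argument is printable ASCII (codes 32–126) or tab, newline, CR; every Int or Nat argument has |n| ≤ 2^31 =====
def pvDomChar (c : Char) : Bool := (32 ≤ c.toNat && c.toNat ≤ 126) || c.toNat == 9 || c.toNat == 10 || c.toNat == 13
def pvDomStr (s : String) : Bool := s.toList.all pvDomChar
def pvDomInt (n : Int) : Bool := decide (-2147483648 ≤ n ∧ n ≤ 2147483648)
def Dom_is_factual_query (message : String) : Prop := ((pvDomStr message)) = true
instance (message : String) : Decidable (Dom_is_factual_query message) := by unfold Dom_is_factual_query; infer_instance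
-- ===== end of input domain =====

-- B replaces A's keyword-major any-loop of substring scans with one position-major
-- left-to-right pass checking startswith at each index (alternative decomposition).


-- ===== PORT A =====
def is_factual_query (message : String) : Bool :=
  let factual_keywords : List String :=
    ["price", "cost", "how much", "ingredients", "contains", "hours",
     "open", "close", "address", "location", "phone", "gluten",
     "vegan", "vegetarian", "allergy", "calories"]
  let message_lower := PySem.Str.lower message
  factual_keywords.any (fun keyword => PySem.Str.isIn keyword message_lower)

-- ===== PORT B =====
-- the 'for i in range(len(m))' loop of Source B, as structural recursion over the suffixes of m
def ifqScan (kws : List (List Char)) : List Char → Bool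
  | [] => false
  | c :: rest =>
    if kws.any (fun k => PySem.Chars.startswith (c :: rest) k) then true
    else ifqScan kws rest

def ifqKeywords : List (List Char) :=
  ["price".toList, "cost".toList, "how much".toList, "ingredients".toList,
   "contains".toList, "hours".toList, "open".toList, "close".toList,
   "address".toList, "location".toList, "phone".toList, "gluten".toList,
   "vegan".toList, "vegetarian".toList, "allergy".toList, "calories".toList]

def is_factual_query_alt (message : String) : Bool :=
  ifqScan ifqKeywords (PySem.Str.lower message).toList

-- ===== PRECONDITION & SPEC =====
def Spec_is_factual_query (message : String) (out : Bool) : Prop := out = is_factual_query_alt message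
instance (message : String) (out : Bool) : Decidable (Spec_is_factual_query message out) := by unfold Spec_is_factual_query; infer_instance

-- ===== CLAIM (what is proved, stated in full; the proofs are below) =====
def Claim_equal_is_factual_query : Prop := ∀ (message : String), Dom_is_factual_query message → Spec_is_factual_query message (is_factual_query message)

-- ===== LEMMAS AND PROOFS =====

theorem ifq_any_or {α : Type} (l : List α) (p q : α → Bool) :
    (l.any fun x => p x || q x) = (l.any p || l.any q) := by
  induction l with
  | nil => simp
  | cons a t ih => simp [List.any_cons, ih]; ac_rfl

theorem ifq_isIn_cons (k : List Char) (c : Char) (rest : List Char) :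
    PySem.Chars.isIn k (c :: rest)
      = (PySem.Chars.startswith (c :: rest) k || PySem.Chars.isIn k rest) := by
  rcases h : PySem.Chars.isIn k rest with _ | _
  · rcases h2 : PySem.Chars.startswith (c :: rest) k with _ | _
    · simp only [Bool.or_false]
      rw [PySem.Chars.isIn_eq_false_iff] at h ⊢
      intro hin
      rcases List.infix_cons_iff.mp hin with hp | hs
      · exact absurd ((PySem.Chars.startswith_iff _ _).mpr hp) (by simp [h2])
      · exact h hs
    · simp only [Bool.true_or]
      exact (PySem.Chars.isIn_iff_infix _ _).mpr
        (List.infix_cons_iff.mpr (Or.inl ((PySem.Chars.startswith_iff _ _).mp h2)))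
  · simp only [Bool.or_true]
    exact (PySem.Chars.isIn_iff_infix _ _).mpr
      (List.infix_cons_iff.mpr (Or.inr ((PySem.Chars.isIn_iff_infix _ _).mp h)))

theorem ifqScan_eq_any (kws : List (List Char)) (hne : ∀ k ∈ kws, k ≠ [])
    (s : List Char) : ifqScan kws s = kws.any (fun k => PySem.Chars.isIn k s) := by
  induction s with
  | nil =>
    simp only [ifqScan]
    symm
    rw [List.any_eq_false]
    intro k hk
    simp only [Bool.not_eq_true, PySem.Chars.isIn_eq_false_iff]
    intro hin
    exact hne k hk (List.infix_nil.mp hin)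
  | cons c rest ih =>
    simp only [ifqScan, ih]
    have : (kws.any fun k => PySem.Chars.isIn k (c :: rest))
        = (kws.any (fun k => PySem.Chars.startswith (c :: rest) k)
           || kws.any (fun k => PySem.Chars.isIn k rest)) := by
      rw [← ifq_any_or]
      simp only [ifq_isIn_cons]
    rw [this]
    cases kws.any (fun k => PySem.Chars.startswith (c :: rest) k) <;> simp

-- ===== VERDICT (by name: the statement is the Claim_ definition above) =====
theorem is_factual_query_spec : Claim_equal_is_factual_query := by
  intro message _
  unfold Spec_is_factual_query is_factual_query is_factual_query_alt
  rw [ifqScan_eq_any ifqKeywords (by decide)]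
  simp [ifqKeywords, PySem.Str.isIn]
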